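-- pv_equiv track=rewrite | github.com/undefineduser76/PythonAlgorithmStudy | Week2/Q4/네오.py | bfs
-- ===== SOURCE A (Python) =====
-- from collections import deque
--
-- def is_valid(idx):
--     return 0 <= idx < 5
--
-- def bfs(start, place, deltas):
--     will_visit = deque([start])
--
--     dist = [[-1 for _ in range(5)] for _ in range(5)]
--
--     dist[start[0]][start[1]] = 0
--
--     while len(will_visit) > 0:
--         now_y, now_x = will_visit.popleft()
--
--         if (now_y, now_x) != start and place[now_y][now_x] == 'P' and dist[now_y][now_x] <= 2:
--             return False
--
--         for dy, dx in deltas: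
--             adj_y, adj_x = now_y + dy, now_x + dx
--
--             if is_valid(adj_y) + is_valid(adj_x) < 2:
--                 continue
--
--             if dist[adj_y][adj_x] != -1:
--                 continue
--
--             if place[adj_y][adj_x] == 'X':
--                 continue
--
--             dist[adj_y][adj_x] = dist[now_y][now_x] + 1
--
--             will_visit.append((adj_y, adj_x))
--
--     return True
-- ===== SOURCE B (Python) =====
-- def is_valid(idx):
--     return 0 <= idx < 5
--
-- def bfs(start, place, deltas):
--     def expand(cells, seen):
--         out = []
--         for y, x in cells:
--             for dy, dx in deltas:
--                 ny, nx = y + dy, x + dx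
--                 if (is_valid(ny) and is_valid(nx)
--                         and (ny, nx) not in seen and (ny, nx) not in out
--                         and place[ny][nx] != 'X'):
--                     out.append((ny, nx))
--         return out
--
--     level1 = expand([start], {start})
--     if any(place[y][x] == 'P' for y, x in level1):
--         return False
--     level2 = expand(level1, {start} | set(level1))
--     if any(place[y][x] == 'P' for y, x in level2):
--         return False
--     return True
-- ===== Notes on version B (the rewrite author's own statement) =====
-- stated objective: alternative
-- what changed: Replaced the queue+dist-array BFS over the whole board by an explicit two-level layer expansion (level1 = open neighbours of start, level2 = open neighbours of level1 not yet seen), checking each layer for 'P'; no queue, no distance array, no exploration beyond distance 2.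
-- outside the precondition, e.g. on bfs((0, 0), [['a', 'b', 'c', 'd', 'e']], [(0, 1)]): A returns True, B returns True
import Mathlib
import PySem

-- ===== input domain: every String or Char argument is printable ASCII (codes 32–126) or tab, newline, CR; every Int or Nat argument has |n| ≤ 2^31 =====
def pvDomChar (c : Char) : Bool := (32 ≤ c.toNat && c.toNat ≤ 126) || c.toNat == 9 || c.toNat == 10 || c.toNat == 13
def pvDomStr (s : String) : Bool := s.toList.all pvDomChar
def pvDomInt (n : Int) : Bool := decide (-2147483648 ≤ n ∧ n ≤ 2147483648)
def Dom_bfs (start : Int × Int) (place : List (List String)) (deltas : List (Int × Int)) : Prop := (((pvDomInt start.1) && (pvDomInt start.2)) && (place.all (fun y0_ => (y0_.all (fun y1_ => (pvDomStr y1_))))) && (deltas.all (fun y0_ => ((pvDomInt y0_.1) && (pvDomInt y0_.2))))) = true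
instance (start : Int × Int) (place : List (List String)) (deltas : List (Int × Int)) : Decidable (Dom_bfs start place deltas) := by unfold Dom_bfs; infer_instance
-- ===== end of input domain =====

-- B replaces the queue+dist-array BFS by an explicit two-level layer expansion (same deltas,
-- same bounds test, only 'X' blocks); objective: alternative decomposition, not claimed faster.

-- ===== PORT A =====
-- shared cell lookup place[y][x] (in range under Pre_, where it is exact)
def pvCell (place : List (List String)) (y x : Int) : String :=
  PySem.List.pyGetD (PySem.List.pyGetD place y []) x ""

def pvIsValid (idx : Int) : Bool := decide (0 ≤ idx ∧ idx < 5)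

-- dist[y][x] read / write (exact at in-range indices, the only ones reached under Pre_)
def pvDGet (dist : List (List Int)) (y x : Int) : Int :=
  PySem.List.pyGetD (PySem.List.pyGetD dist y []) x (-2)

def pvDSet (dist : List (List Int)) (y x : Int) (v : Int) : List (List Int) :=
  PySem.List.pySetD dist y (PySem.List.pySetD (PySem.List.pyGetD dist y []) x v)

-- body of A's inner `for dy, dx in deltas` loop
def bfsInner (place : List (List String)) (start : Int × Int) (nowY nowX : Int)
    (st : List (Int × Int) × List (List Int)) (dd : Int × Int) :
    List (Int × Int) × List (List Int) :=
  let adjY := nowY + dd.1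
  let adjX := nowX + dd.2
  if (if pvIsValid adjY then (1 : Int) else 0) + (if pvIsValid adjX then 1 else 0) < 2 then st
  else if pvDGet st.2 adjY adjX ≠ -1 then st
  else if pvCell place adjY adjX = "X" then st
  else (st.1 ++ [(adjY, adjX)], pvDSet st.2 adjY adjX (pvDGet st.2 nowY nowX + 1))

-- A's `while len(will_visit) > 0` loop; the fuel only makes it total (under Pre_ the loop
-- pops at most 25 cells, so fuel 26 is never exhausted — proved below)
def bfsLoop (start : Int × Int) (place : List (List String)) (deltas : List (Int × Int)) :
    Nat → List (Int × Int) → List (List Int) → Bool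
  | 0, _, _ => true
  | fuel + 1, willVisit, dist =>
    match willVisit with
    | [] => true
    | (nowY, nowX) :: rest =>
      if (nowY, nowX) ≠ start ∧ pvCell place nowY nowX = "P" ∧ pvDGet dist nowY nowX ≤ 2 then
        false
      else
        let st := deltas.foldl (bfsInner place start nowY nowX) (rest, dist)
        bfsLoop start place deltas fuel st.1 st.2

def bfs (start : Int × Int) (place : List (List String)) (deltas : List (Int × Int)) : Bool :=
  let dist0 := (PySem.List.pyRange 0 5 1).map (fun _ => (PySem.List.pyRange 0 5 1).map (fun _ => (-1 : Int)))
  bfsLoop start place deltas 26 [start] (pvDSet dist0 start.1 start.2 0)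

-- ===== PORT B =====
-- body of B's inner `for dy, dx in deltas` loop
def pvExpandInner (place : List (List String)) (seen : PySem.Set (Int × Int)) (c : Int × Int)
    (out : List (Int × Int)) (dd : Int × Int) : List (Int × Int) :=
  let ny := c.1 + dd.1
  let nx := c.2 + dd.2
  if pvIsValid ny ∧ pvIsValid nx ∧ (ny, nx) ∉ seen ∧ (ny, nx) ∉ out ∧ pvCell place ny nx ≠ "X"
  then out ++ [(ny, nx)] else out

def pvExpand (place : List (List String)) (deltas : List (Int × Int))
    (cells : List (Int × Int)) (seen : PySem.Set (Int × Int)) : List (Int × Int) :=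
  cells.foldl (fun out c => deltas.foldl (pvExpandInner place seen c) out) []

def bfs_alt (start : Int × Int) (place : List (List String)) (deltas : List (Int × Int)) : Bool :=
  let level1 := pvExpand place deltas [start] (PySem.Set.ofList [start])
  if level1.any (fun c => pvCell place c.1 c.2 == "P") then false
  else
    let level2 := pvExpand place deltas level1 (PySem.Set.ofList ([start] ++ level1))
    if level2.any (fun c => pvCell place c.1 c.2 == "P") then false
    else true

abbrev pvValid (c : Int × Int) : Prop :=
  0 ≤ c.1 ∧ c.1 < 5 ∧ 0 ≤ c.2 ∧ c.2 < 5

-- ===== PRECONDITION & SPEC =====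
-- Pre_ admits (a) valid starts on boards with 5 full rows of 5 and (b) any board whose start lies
-- in the -5..4 dist range and whose deltas give no usable first step (each in-bounds neighbour is
-- the start itself or an existing 'X' cell, so the BFS stops immediately). It excludes inputs
-- where A raises IndexError (start outside -5..4, or a walk reaching a missing cell) and inputs
-- where A returns but its value is an artefact: a negative start with reachable in-bounds
-- neighbours (Python negative-index wraparound in the dist array) or a deeper walk that happens
-- to survive a short board; B is not made to mimic those.
def Pre_bfs (start : Int × Int) (place : List (List String)) (deltas : List (Int × Int)) : Prop :=
  (-5 ≤ start.1 ∧ start.1 < 5 ∧ -5 ≤ start.2 ∧ start.2 < 5) ∧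
    ((0 ≤ start.1 ∧ 0 ≤ start.2 ∧ 5 ≤ place.length ∧ ∀ row ∈ place.take 5, 5 ≤ row.length) ∨
      (∀ d ∈ deltas, ¬ pvValid (start.1 + d.1, start.2 + d.2) ∨
        (start.1 + d.1, start.2 + d.2) = start ∨
        (start.1 + d.1 < (place.length : Int) ∧
          start.2 + d.2 < ((PySem.List.pyGetD place (start.1 + d.1) []).length : Int) ∧
          pvCell place (start.1 + d.1) (start.2 + d.2) = "X")))
instance (start : Int × Int) (place : List (List String)) (deltas : List (Int × Int)) : Decidable (Pre_bfs start place deltas) := by unfold Pre_bfs; infer_instance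

def pvWitness_bfs : (Int × Int) × List (List String) × (List (Int × Int)) :=
  ((2, 2),
   [["O","O","O","O","O"],["O","O","O","O","O"],["O","O","O","O","P"],["O","O","X","O","O"],["O","O","O","O","O"]],
   [(0, 1), (1, 0), (0, -1), (-1, 0)])

def Spec_bfs (start : Int × Int) (place : List (List String)) (deltas : List (Int × Int)) (out : Bool) : Prop := out = bfs_alt start place deltas
instance (start : Int × Int) (place : List (List String)) (deltas : List (Int × Int)) (out : Bool) : Decidable (Spec_bfs start place deltas out) := by unfold Spec_bfs; infer_instance

-- ===== CLAIM (what is proved, stated in full; the proofs are below) =====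
def Claim_equal_bfs : Prop := ∀ (start : Int × Int) (place : List (List String)) (deltas : List (Int × Int)), Dom_bfs start place deltas → Pre_bfs start place deltas → Spec_bfs start place deltas (bfs start place deltas)

-- ===== LEMMAS AND PROOFS =====

-- abstract vocabulary for the proof
def pvOpen (place : List (List String)) (c : Int × Int) : Prop :=
  pvValid c ∧ pvCell place c.1 c.2 ≠ "X"
def pvNbr (deltas : List (Int × Int)) (b c : Int × Int) : Prop :=
  ∃ d ∈ deltas, c = (b.1 + d.1, b.2 + d.2)
def pvNonP (place : List (List String)) (c : Int × Int) : Prop := pvCell place c.1 c.2 ≠ "P"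
def pvShape (dist : List (List Int)) : Prop := dist.length = 5 ∧ ∀ r ∈ dist, r.length = 5
def pvCnt (dist : List (List Int)) : Nat := (dist.map (fun r => r.count (-1))).sum
def dg (dist : List (List Int)) (c : Int × Int) : Int := pvDGet dist c.1 c.2
def ds (dist : List (List Int)) (c : Int × Int) (v : Int) : List (List Int) := pvDSet dist c.1 c.2 v

def dist0def : List (List Int) :=
  (PySem.List.pyRange 0 5 1).map (fun _ => (PySem.List.pyRange 0 5 1).map (fun _ => (-1 : Int)))

-- general list facts used by the counting argument
theorem pv_count_set : ∀ (l : List Int) (n : Nat) (v : Int) (h : n < l.length), l[n]'h = -1 → v ≠ -1 →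
    (l.set n v).count (-1) + 1 = l.count (-1)
  | [], n, v, h, _, _ => by simp at h
  | x :: xs, 0, v, h, hm, hv => by
    simp at hm
    simp [hm, hv]
  | x :: xs, n+1, v, h, hm, hv => by
    simp at h hm
    have := pv_count_set xs n v h (by simpa using hm) hv
    simp [List.count_cons]
    omega

theorem pv_sum_set : ∀ (l : List Nat) (n : Nat) (v : Nat) (h : n < l.length),
    (l.set n v).sum + l[n]'h = l.sum + v
  | [], n, v, h => by simp at h
  | x :: xs, 0, v, h => by simp; omega
  | x :: xs, n+1, v, h => by
    simp at h
    have := pv_sum_set xs n v h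
    simp
    omega

-- low-level dist-array lemmas
theorem shape_ds {dist : List (List Int)} {a : Int × Int} {v : Int}
    (h : pvShape dist) (ha : pvValid a) : pvShape (ds dist a v) := by
  obtain ⟨hlen, hrow⟩ := h
  obtain ⟨h1, h2, h3, h4⟩ := ha
  unfold ds pvDSet
  rw [PySem.List.pySetD_of_nonneg _ _ h1, PySem.List.pySetD_of_nonneg _ _ h3,
    PySem.List.pyGetD_eq_getElem _ _ h1 (by omega)]
  refine ⟨by simpa using hlen, ?_⟩
  intro r hr
  rcases List.mem_or_eq_of_mem_set hr with hr' | hr'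
  · exact hrow r hr'
  · subst hr'
    simpa using hrow _ (List.getElem_mem _)

theorem dg_ds {dist : List (List Int)} {a c : Int × Int} {v : Int}
    (h : pvShape dist) (ha : pvValid a) (hc : pvValid c) :
    dg (ds dist a v) c = if c = a then v else dg dist c := by
  obtain ⟨hlen, hrow⟩ := h
  obtain ⟨a1, a2, a3, a4⟩ := ha
  obtain ⟨c1, c2, c3, c4⟩ := hc
  have hya : a.1.toNat < dist.length := by omega
  have hyc : c.1.toNat < dist.length := by omega
  have hrowA : (dist[a.1.toNat]'hya).length = 5 := hrow _ (List.getElem_mem _)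
  have hrowC : (dist[c.1.toNat]'hyc).length = 5 := hrow _ (List.getElem_mem _)
  unfold ds pvDSet dg pvDGet
  rw [PySem.List.pyGetD_eq_getElem _ ([] : List Int) a1 (by omega),
    PySem.List.pySetD_of_nonneg _ _ a1, PySem.List.pySetD_of_nonneg _ _ a3,
    PySem.List.pyGetD_eq_getElem _ ([] : List Int) c1 (by simp; omega),
    PySem.List.pyGetD_eq_getElem _ ([] : List Int) c1 (by omega),
    List.getElem_set]
  by_cases hy : a.1.toNat = c.1.toNat
  · rw [if_pos hy]
    rw [PySem.List.pyGetD_eq_getElem _ _ c3 (by simp [hrowA]; omega), List.getElem_set,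
      PySem.List.pyGetD_eq_getElem _ _ c3 (by omega)]
    by_cases hx : a.2.toNat = c.2.toNat
    · rw [if_pos hx]
      have : c = a := Prod.ext (by omega) (by omega)
      rw [if_pos this]
    · rw [if_neg hx]
      have : c ≠ a := by
        intro hce
        subst hce
        omega
      rw [if_neg this]
      simp only [hy]
  · rw [if_neg hy]
    have : c ≠ a := by
      intro hce
      subst hce
      omega
    rw [if_neg this, PySem.List.pyGetD_eq_getElem _ _ c3 (by omega)]

theorem cnt_ds {dist : List (List Int)} {a : Int × Int} {v : Int}
    (h : pvShape dist) (ha : pvValid a) (hv : v ≠ -1) (hm : dg dist a = -1) :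
    pvCnt (ds dist a v) + 1 = pvCnt dist := by
  obtain ⟨hlen, hrow⟩ := h
  obtain ⟨a1, a2, a3, a4⟩ := ha
  have hya : a.1.toNat < dist.length := by omega
  have hrowA : (dist[a.1.toNat]'hya).length = 5 := hrow _ (List.getElem_mem _)
  unfold dg pvDGet at hm
  rw [PySem.List.pyGetD_eq_getElem _ ([] : List Int) a1 (by omega),
    PySem.List.pyGetD_eq_getElem _ _ a3 (by omega)] at hm
  unfold ds pvDSet pvCnt
  rw [PySem.List.pyGetD_eq_getElem _ ([] : List Int) a1 (by omega),
    PySem.List.pySetD_of_nonneg _ _ a1, PySem.List.pySetD_of_nonneg _ _ a3, List.map_set]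
  have hcount := pv_count_set (dist[a.1.toNat]'hya) a.2.toNat v (by omega) hm hv
  have hsum := pv_sum_set (dist.map (fun r => r.count (-1))) a.1.toNat
      (((dist[a.1.toNat]'hya).set a.2.toNat v).count (-1)) (by simpa using hya)
  rw [List.getElem_map] at hsum
  omega

theorem shape_dist0 : pvShape dist0def := by unfold pvShape dist0def; decide
theorem cnt_dist0 : pvCnt dist0def = 25 := by decide
theorem dg_dist0 {c : Int × Int} (hc : pvValid c) : dg dist0def c = -1 := by
  obtain ⟨c1, c2, c3, c4⟩ := hc
  obtain ⟨y, x⟩ := c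
  simp only at c1 c2 c3 c4
  interval_cases y <;> interval_cases x <;> decide

theorem guard1_iff (aY aX : Int) :
    ((if pvIsValid aY then (1 : Int) else 0) + (if pvIsValid aX then 1 else 0) < 2) ↔
      ¬ pvValid (aY, aX) := by
  unfold pvIsValid pvValid
  split_ifs with h1 h2 h2 <;> simp_all

theorem bfsInner_eq (place : List (List String)) (start : Int × Int) (nY nX : Int)
    (q : List (Int × Int)) (dist : List (List Int)) (dd : Int × Int) :
    bfsInner place start nY nX (q, dist) dd =
      if pvValid (nY + dd.1, nX + dd.2) ∧ pvDGet dist (nY + dd.1) (nX + dd.2) = -1 ∧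
          pvCell place (nY + dd.1) (nX + dd.2) ≠ "X"
      then (q ++ [(nY + dd.1, nX + dd.2)], pvDSet dist (nY + dd.1) (nX + dd.2) (pvDGet dist nY nX + 1))
      else (q, dist) := by
  simp only [bfsInner, guard1_iff]
  split_ifs <;> tauto

-- characterisation of A's inner for-loop over deltas
theorem foldStep (place : List (List String)) (start : Int × Int)
    (now : Int × Int) (dv : Int) :
    ∀ (dltas : List (Int × Int)) (q : List (Int × Int)) (dist : List (List Int)),
    pvShape dist → pvValid now → 0 ≤ dv → dg dist now = dv →
    ∃ nw D',
      dltas.foldl (bfsInner place start now.1 now.2) (q, dist) = (q ++ nw, D') ∧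
      (∀ c, c ∈ nw ↔ pvNbr dltas now c ∧ pvValid c ∧ dg dist c = -1 ∧ pvCell place c.1 c.2 ≠ "X") ∧
      pvShape D' ∧
      (∀ c, pvValid c → dg D' c = if c ∈ nw then dv + 1 else dg dist c) ∧
      pvCnt D' + nw.length = pvCnt dist ∧
      (∀ c ∈ nw, pvValid c) := by
  intro dltas
  induction dltas with
  | nil =>
    intro q dist hS hN hdv hdg
    exact ⟨[], dist, by simp, by simp [pvNbr], hS, by intro c _; simp, by simp, by simp⟩
  | cons dd ds' ih =>
    intro q dist hS hN hdv hdg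
    rw [List.foldl_cons, bfsInner_eq]
    set adj : Int × Int := (now.1 + dd.1, now.2 + dd.2) with hadj
    by_cases hcond : pvValid adj ∧ pvDGet dist adj.1 adj.2 = -1 ∧ pvCell place adj.1 adj.2 ≠ "X"
    · rw [if_pos hcond]
      obtain ⟨hval, hm1, hX⟩ := hcond
      have hdgadj : dg dist adj = -1 := hm1
      have hadjnow : adj ≠ now := by
        intro he
        rw [he] at hdgadj
        omega
      have hdvX : pvDGet dist now.1 now.2 + 1 = dv + 1 := by
        rw [show pvDGet dist now.1 now.2 = dv from hdg]

      rw [hdvX]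
      have hS1 : pvShape (ds dist adj (dv + 1)) := shape_ds hS hval
      have hdg1 : dg (ds dist adj (dv + 1)) now = dv := by
        rw [dg_ds hS hval hN, if_neg (by intro he; exact hadjnow he.symm)]
        exact hdg
      obtain ⟨nw', D', heq, hmem, hS', hdget, hcnt, hvalid⟩ :=
        ih (q ++ [adj]) (ds dist adj (dv + 1)) hS1 hN hdv hdg1
      refine ⟨adj :: nw', D', ?_, ?_, hS', ?_, ?_, ?_⟩
      · rw [show pvDSet dist adj.1 adj.2 (dv+1) = ds dist adj (dv+1) from rfl, heq]
        simp
      · intro c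
        rw [List.mem_cons, hmem c]
        constructor
        · rintro (rfl | ⟨hnbr, hcv, hd1, hcx⟩)
          · exact ⟨⟨dd, by simp, rfl⟩, hval, hdgadj, hX⟩
          · have hcadj : c ≠ adj := by
              intro he
              rw [dg_ds hS hval hcv, if_pos he] at hd1
              omega
            rw [dg_ds hS hval hcv, if_neg hcadj] at hd1
            exact ⟨by obtain ⟨d, hd, hcd⟩ := hnbr; exact ⟨d, by simp [hd], hcd⟩, hcv, hd1, hcx⟩
        · rintro ⟨⟨d, hd, hcd⟩, hcv, hdm1, hcx⟩
          rcases List.mem_cons.mp hd with rfl | hd'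
          · left; rw [hcd]
          · by_cases hce : c = adj
            · left; exact hce
            · right
              refine ⟨⟨d, hd', hcd⟩, hcv, ?_, hcx⟩
              rw [dg_ds hS hval hcv, if_neg hce]
              exact hdm1
      · intro c hcv
        rw [hdget c hcv, dg_ds hS hval hcv]
        by_cases h1 : c ∈ nw'
        · rw [if_pos h1, if_pos (by simp [h1])]
        · by_cases h2 : c = adj
          · rw [if_neg h1, if_pos h2, if_pos (by simp [h2])]
          · rw [if_neg h1, if_neg h2, if_neg (by simp [h1, h2])]
      · have := cnt_ds (v := dv + 1) hS hval (by omega) hdgadj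
        have : pvCnt (ds dist adj (dv+1)) + 1 = pvCnt dist := this
        simp only [List.length_cons]
        omega
      · intro c hc
        rcases List.mem_cons.mp hc with rfl | hc'
        · exact hval
        · exact hvalid c hc'
    · rw [if_neg hcond]
      obtain ⟨nw', D', heq, hmem, hS', hdget, hcnt, hvalid⟩ := ih q dist hS hN hdv hdg
      refine ⟨nw', D', heq, ?_, hS', hdget, hcnt, hvalid⟩
      intro c
      rw [hmem c]
      constructor
      · rintro ⟨⟨d, hd, hcd⟩, hcv, hdm1, hcx⟩
        exact ⟨⟨d, by simp [hd], hcd⟩, hcv, hdm1, hcx⟩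
      · rintro ⟨⟨d, hd, hcd⟩, hcv, hdm1, hcx⟩
        rcases List.mem_cons.mp hd with rfl | hd'
        · subst hcd
          exact absurd ⟨hcv, hdm1, hcx⟩ hcond
        · exact ⟨⟨d, hd', hcd⟩, hcv, hdm1, hcx⟩

theorem bfsLoop_succ_cons (start : Int × Int) (place : List (List String))
    (deltas : List (Int × Int)) (n : Nat) (nowY nowX : Int) (rest : List (Int × Int))
    (dist : List (List Int)) :
    bfsLoop start place deltas (n + 1) ((nowY, nowX) :: rest) dist =
      if (nowY, nowX) ≠ start ∧ pvCell place nowY nowX = "P" ∧ pvDGet dist nowY nowX ≤ 2 then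
        false
      else
        (fun st : List (Int × Int) × List (List Int) => bfsLoop start place deltas n st.1 st.2)
          (deltas.foldl (bfsInner place start nowY nowX) (rest, dist)) := rfl

-- phase ≥ 3: every queued cell has distance ≥ 3, the loop only drains and returns True
theorem tail3 (start : Int × Int) (place : List (List String)) (deltas : List (Int × Int)) :
    ∀ (fuel : Nat) (q : List (Int × Int)) (dist : List (List Int)),
    pvShape dist → (∀ c ∈ q, pvValid c ∧ 3 ≤ dg dist c) → q.length + pvCnt dist ≤ fuel →
    bfsLoop start place deltas fuel q dist = true := by
  intro fuel
  induction fuel with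
  | zero =>
    intro q dist _ _ _
    simp [bfsLoop]
  | succ n ih =>
    rintro (_ | ⟨⟨cy, cx⟩, rest⟩) dist hS hq hfuel
    · simp [bfsLoop]
    · have hc := hq (cy, cx) List.mem_cons_self
      simp only [bfsLoop]
      rw [if_neg (by have h3 : 3 ≤ pvDGet dist cy cx := hc.2; push_neg; intro _ _; omega)]
      obtain ⟨nw, D', heq, hmem, hS', hdget, hcnt, hvalid⟩ :=
        foldStep place start (cy, cx) (dg dist (cy, cx)) deltas rest dist hS hc.1 (by omega) rfl
      rw [heq]
      simp only
      apply ih _ _ hS'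
      · intro c hcm
        rcases List.mem_append.mp hcm with hcr | hcn
        · obtain ⟨hcv, hcd⟩ := hq c (List.mem_cons_of_mem _ hcr)
          have hnn : c ∉ nw := by
            intro hcn
            have := ((hmem c).mp hcn).2.2.1
            omega
          refine ⟨hcv, ?_⟩
          rw [hdget c hcv, if_neg hnn]
          exact hcd
        · obtain ⟨hnbr, hcv, hcd, hcx⟩ := (hmem c).mp hcn
          refine ⟨hcv, ?_⟩
          rw [hdget c hcv, if_pos hcn]
          omega
      · have h1 : (rest ++ nw).length = rest.length + nw.length := List.length_append
        simp only [List.length_cons] at hfuel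
        omega

-- phase 2: queue = layer-2 cells ++ layer-3 cells
theorem phase2 (start : Int × Int) (place : List (List String)) (deltas : List (Int × Int)) :
    ∀ (q2 : List (Int × Int)) (fuel : Nat) (q3 : List (Int × Int)) (dist : List (List Int)),
    pvShape dist → pvValid start → dg dist start = 0 →
    (∀ c ∈ q2, pvValid c ∧ dg dist c = 2) → (∀ c ∈ q3, pvValid c ∧ dg dist c = 3) →
    q2.length + q3.length + pvCnt dist ≤ fuel →
    (bfsLoop start place deltas fuel (q2 ++ q3) dist = true ↔ ∀ c ∈ q2, pvNonP place c) := by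
  intro q2
  induction q2 with
  | nil =>
    intro fuel q3 dist hS hvs hds hq2 hq3 hfuel
    simp only [List.nil_append]
    rw [tail3 start place deltas fuel q3 dist hS
      (fun c hc => ⟨(hq3 c hc).1, by have := (hq3 c hc).2; omega⟩) (by simp at hfuel; omega)]
    simp
  | cons c rest ih =>
    intro fuel q3 dist hS hvs hds hq2 hq3 hfuel
    obtain ⟨cy, cx⟩ := c
    have hc := hq2 (cy, cx) List.mem_cons_self
    have hc2 : pvDGet dist cy cx = 2 := hc.2
    cases fuel with
    | zero =>
      simp only [List.length_cons] at hfuel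
      omega
    | succ n =>
      simp only [List.cons_append, bfsLoop]
      have hcs : (cy, cx) ≠ start := by
        intro he
        have := hc.2
        rw [he, hds] at this
        omega
      by_cases hP : pvCell place cy cx = "P"
      · rw [if_pos ⟨hcs, hP, by omega⟩]
        simp only [Bool.false_eq_true, false_iff]
        intro hall
        exact absurd hP (hall (cy, cx) List.mem_cons_self)
      · rw [if_neg (by rintro ⟨_, hB, _⟩; exact hP hB)]
        obtain ⟨nw, D', heq, hmem, hS', hdget, hcnt, hvalid⟩ :=
          foldStep place start (cy, cx) 2 deltas (rest ++ q3) dist hS hc.1 (by omega) hc.2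
        rw [heq]
        simp only
        have hsn : start ∉ nw := by
          intro hsm
          have := ((hmem start).mp hsm).2.2.1
          omega
        rw [List.append_assoc]
        rw [ih n (q3 ++ nw) D' hS' hvs
          (by rw [hdget start hvs, if_neg hsn]; exact hds)
          (by
            intro c hcm
            obtain ⟨hcv, hcd⟩ := hq2 c (List.mem_cons_of_mem _ hcm)
            have hnn : c ∉ nw := by
              intro hcn
              have := ((hmem c).mp hcn).2.2.1
              omega
            exact ⟨hcv, by rw [hdget c hcv, if_neg hnn]; exact hcd⟩)
          (by
            intro c hcm
            rcases List.mem_append.mp hcm with hc3 | hcn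
            · obtain ⟨hcv, hcd⟩ := hq3 c hc3
              have hnn : c ∉ nw := by
                intro hcn
                have := ((hmem c).mp hcn).2.2.1
                omega
              exact ⟨hcv, by rw [hdget c hcv, if_neg hnn]; exact hcd⟩
            · exact ⟨hvalid c hcn, by rw [hdget c (hvalid c hcn), if_pos hcn]; norm_num⟩)
          (by
            have h1 : (rest ++ q3).length = rest.length + q3.length := List.length_append
            have h2 : (q3 ++ nw).length = q3.length + nw.length := List.length_append
            simp only [List.length_cons] at hfuel
            omega)]
        simp only [List.forall_mem_cons]
        have : pvNonP place (cy, cx) := hP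
        tauto

-- phase 1: queue = layer-1 cells ++ layer-2 cells
theorem phase1 (start : Int × Int) (place : List (List String)) (deltas : List (Int × Int)) :
    ∀ (q1 : List (Int × Int)) (fuel : Nat) (q2 : List (Int × Int)) (dist : List (List Int)),
    pvShape dist → pvValid start → dg dist start = 0 →
    (∀ c ∈ q1, pvValid c ∧ dg dist c = 1) → (∀ c ∈ q2, pvValid c ∧ dg dist c = 2) →
    q1.length + q2.length + pvCnt dist ≤ fuel →
    (bfsLoop start place deltas fuel (q1 ++ q2) dist = true ↔
      (∀ c ∈ q1, pvNonP place c) ∧ (∀ c ∈ q2, pvNonP place c) ∧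
        (∀ c, (∃ b ∈ q1, pvNbr deltas b c) → pvOpen place c → dg dist c = -1 → pvNonP place c)) := by
  intro q1
  induction q1 with
  | nil =>
    intro fuel q2 dist hS hvs hds hq1 hq2 hfuel
    simp only [List.nil_append]
    have h := phase2 start place deltas q2 fuel [] dist hS hvs hds hq2 (by simp)
      (by simp at hfuel ⊢; omega)
    rw [List.append_nil] at h
    rw [h]
    simp
  | cons b rest ih =>
    intro fuel q2 dist hS hvs hds hq1 hq2 hfuel
    obtain ⟨cy, cx⟩ := b
    have hc := hq1 (cy, cx) List.mem_cons_self
    have hc2 : pvDGet dist cy cx = 1 := hc.2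
    cases fuel with
    | zero =>
      simp only [List.length_cons] at hfuel
      omega
    | succ n =>
      simp only [List.cons_append, bfsLoop]
      have hcs : (cy, cx) ≠ start := by
        intro he
        have := hc.2
        rw [he, hds] at this
        omega
      by_cases hP : pvCell place cy cx = "P"
      · rw [if_pos ⟨hcs, hP, by omega⟩]
        simp only [Bool.false_eq_true, false_iff]
        rintro ⟨h1, _, _⟩
        exact absurd hP (h1 (cy, cx) List.mem_cons_self)
      · rw [if_neg (by rintro ⟨_, hB, _⟩; exact hP hB)]
        obtain ⟨nw, D', heq, hmem, hS', hdget, hcnt, hvalid⟩ :=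
          foldStep place start (cy, cx) 1 deltas (rest ++ q2) dist hS hc.1 (by omega) hc.2
        rw [heq]
        simp only
        have hnotnw : ∀ c : Int × Int, dg dist c ≠ -1 → c ∉ nw := by
          intro c hne hcn
          exact hne ((hmem c).mp hcn).2.2.1
        have hsn : start ∉ nw := hnotnw start (by omega)
        rw [List.append_assoc]
        rw [ih n (q2 ++ nw) D' hS' hvs
          (by rw [hdget start hvs, if_neg hsn]; exact hds)
          (by
            intro c hcm
            obtain ⟨hcv, hcd⟩ := hq1 c (List.mem_cons_of_mem _ hcm)
            exact ⟨hcv, by rw [hdget c hcv, if_neg (hnotnw c (by omega))]; exact hcd⟩)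
          (by
            intro c hcm
            rcases List.mem_append.mp hcm with hc3 | hcn
            · obtain ⟨hcv, hcd⟩ := hq2 c hc3
              exact ⟨hcv, by rw [hdget c hcv, if_neg (hnotnw c (by omega))]; exact hcd⟩
            · exact ⟨hvalid c hcn, by rw [hdget c (hvalid c hcn), if_pos hcn]; norm_num⟩)
          (by
            have h1 : (rest ++ q2).length = rest.length + q2.length := List.length_append
            have h2 : (q2 ++ nw).length = q2.length + nw.length := List.length_append
            simp only [List.length_cons] at hfuel
            omega)]
        have hPn : pvNonP place (cy, cx) := hP
        constructor
        · rintro ⟨h1, h2, h3⟩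
          refine ⟨List.forall_mem_cons.mpr ⟨hPn, h1⟩, fun c hc' => h2 c (List.mem_append_left _ hc'), ?_⟩
          intro c hnbr hopen hd1
          obtain ⟨bb, hb, hnb⟩ := hnbr
          rcases List.mem_cons.mp hb with rfl | hb'
          · exact h2 c (List.mem_append_right _ ((hmem c).mpr ⟨hnb, hopen.1, hd1, hopen.2⟩))
          · by_cases hcn : c ∈ nw
            · exact h2 c (List.mem_append_right _ hcn)
            · refine h3 c ⟨bb, hb', hnb⟩ hopen ?_
              rw [hdget c hopen.1, if_neg hcn]
              exact hd1
        · rintro ⟨h1, h2, h3⟩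
          refine ⟨fun c hc' => h1 c (List.mem_cons_of_mem _ hc'), ?_, ?_⟩
          · intro c hcm
            rcases List.mem_append.mp hcm with hcq | hcn
            · exact h2 c hcq
            · obtain ⟨hnb, hcv, hd1, hcx⟩ := (hmem c).mp hcn
              exact h3 c ⟨(cy, cx), List.mem_cons_self, hnb⟩ ⟨hcv, hcx⟩ hd1
          · intro c hnbr hopen hdD
            have hcn : c ∉ nw := by
              intro hcn
              rw [hdget c hopen.1, if_pos hcn] at hdD
              omega
            rw [hdget c hopen.1, if_neg hcn] at hdD
            obtain ⟨bb, hb', hnb⟩ := hnbr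
            exact h3 c ⟨bb, List.mem_cons_of_mem _ hb', hnb⟩ hopen hdD

-- the two layers, abstractly
def pvL1 (place : List (List String)) (deltas : List (Int × Int)) (start c : Int × Int) : Prop :=
  pvNbr deltas start c ∧ pvOpen place c ∧ c ≠ start
def pvL2 (place : List (List String)) (deltas : List (Int × Int)) (start c : Int × Int) : Prop :=
  (∃ b, pvL1 place deltas start b ∧ pvNbr deltas b c) ∧ pvOpen place c ∧ c ≠ start ∧
    ¬ pvL1 place deltas start c

theorem bfs_char (start : Int × Int) (place : List (List String)) (deltas : List (Int × Int))
    (hs : pvValid start) :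
    (bfs start place deltas = true ↔
      (∀ c, pvL1 place deltas start c → pvNonP place c) ∧
        (∀ c, pvL2 place deltas start c → pvNonP place c)) := by
  have hS1 : pvShape (ds dist0def start 0) := shape_ds shape_dist0 hs
  have hdg1 : ∀ c, pvValid c → dg (ds dist0def start 0) c = if c = start then 0 else -1 := by
    intro c hc
    rw [dg_ds shape_dist0 hs hc]
    by_cases he : c = start
    · rw [if_pos he, if_pos he]
    · rw [if_neg he, if_neg he, dg_dist0 hc]
  have hcnt1 : pvCnt (ds dist0def start 0) = 24 := by
    have := cnt_ds (v := 0) shape_dist0 hs (by omega) (dg_dist0 hs)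
    rw [cnt_dist0] at this
    omega
  show (bfsLoop start place deltas 26 [start] (pvDSet dist0def start.1 start.2 0) = true ↔ _)
  obtain ⟨sy, sx⟩ := start
  rw [show (26 : Nat) = 25 + 1 from rfl, bfsLoop_succ_cons]
  rw [if_neg (by rintro ⟨hne, _, _⟩; exact hne rfl)]
  obtain ⟨nw, D', heq, hmem, hS', hdget, hcnt, hvalid⟩ :=
    foldStep place (sy, sx) (sy, sx) 0 deltas [] (ds dist0def (sy, sx) 0) hS1 hs (by omega)
      (by rw [hdg1 (sy, sx) hs, if_pos rfl])
  rw [show pvDSet dist0def (sy, sx).1 (sy, sx).2 0 = ds dist0def (sy, sx) 0 from rfl, heq]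
  simp only [List.nil_append]
  have hmemL1 : ∀ c, c ∈ nw ↔ pvL1 place deltas (sy, sx) c := by
    intro c
    rw [hmem c]
    constructor
    · rintro ⟨hnb, hcv, hd1, hcx⟩
      have hne : c ≠ (sy, sx) := by
        intro he
        rw [hdg1 c hcv, if_pos he] at hd1
        omega
      exact ⟨hnb, ⟨hcv, hcx⟩, hne⟩
    · rintro ⟨hnb, ⟨hcv, hcx⟩, hne⟩
      exact ⟨hnb, hcv, by rw [hdg1 c hcv, if_neg hne], hcx⟩
  have h := phase1 (sy, sx) place deltas nw 25 [] D' hS' hs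
    (by
      rw [hdget (sy, sx) hs, if_neg (by
        intro hsm
        have := ((hmem (sy, sx)).mp hsm).2.2.1
        rw [hdg1 (sy, sx) hs, if_pos rfl] at this
        omega), hdg1 (sy, sx) hs, if_pos rfl])
    (by
      intro c hcm
      exact ⟨hvalid c hcm, by rw [hdget c (hvalid c hcm), if_pos hcm]; norm_num⟩)
    (by simp)
    (by simp; omega)
  rw [List.append_nil] at h
  rw [h]
  constructor
  · rintro ⟨h1, _, h3⟩
    refine ⟨fun c hc => h1 c ((hmemL1 c).mpr hc), ?_⟩
    rintro c ⟨⟨bb, hbL1, hnb⟩, hopen, hne, hnL1⟩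
    refine h3 c ⟨bb, (hmemL1 bb).mpr hbL1, hnb⟩ hopen ?_
    rw [hdget c hopen.1, if_neg (fun hcn => hnL1 ((hmemL1 c).mp hcn)), hdg1 c hopen.1, if_neg hne]
  · rintro ⟨h1, h2⟩
    refine ⟨fun c hc => h1 c ((hmemL1 c).mp hc), by simp, ?_⟩
    rintro c ⟨bb, hbnw, hnb⟩ hopen hdD
    have hcn : c ∉ nw := by
      intro hcn
      rw [hdget c hopen.1, if_pos hcn] at hdD
      omega
    rw [hdget c hopen.1, if_neg hcn, hdg1 c hopen.1] at hdD
    have hne : c ≠ (sy, sx) := by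
      intro he
      rw [if_pos he] at hdD
      omega
    exact h2 c ⟨⟨bb, (hmemL1 bb).mp hbnw, hnb⟩, hopen, hne, fun hL1 => hcn ((hmemL1 c).mpr hL1)⟩

-- B-side: membership in pvExpand's output
theorem pvValid_isValid (y x : Int) :
    (pvIsValid y = true ∧ pvIsValid x = true) ↔ pvValid (y, x) := by
  simp only [pvIsValid, pvValid, decide_eq_true_eq]
  tauto

theorem expand_inner_mem (place : List (List String)) (seen : PySem.Set (Int × Int))
    (b : Int × Int) :
    ∀ (ds : List (Int × Int)) (out : List (Int × Int)) (c : Int × Int),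
    (c ∈ ds.foldl (pvExpandInner place seen b) out ↔
      c ∈ out ∨ ((∃ d ∈ ds, c = (b.1 + d.1, b.2 + d.2)) ∧ pvValid c ∧
        pvCell place c.1 c.2 ≠ "X" ∧ c ∉ seen)) := by
  intro ds
  induction ds with
  | nil =>
    intro out c
    simp
  | cons dd ds' ih =>
    intro out c
    simp only [List.foldl_cons, pvExpandInner]
    split_ifs with hG
    · rw [ih, List.mem_append, List.mem_singleton]
      obtain ⟨hGy, hGx, hGs, hGo, hGX⟩ := hG
      constructor
      · rintro ((hout | rfl) | ⟨⟨d, hd, hcd⟩, hP⟩)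
        · exact Or.inl hout
        · exact Or.inr ⟨⟨dd, List.mem_cons_self, rfl⟩, (pvValid_isValid _ _).mp ⟨hGy, hGx⟩, hGX, hGs⟩
        · exact Or.inr ⟨⟨d, List.mem_cons_of_mem _ hd, hcd⟩, hP⟩
      · rintro (hout | ⟨⟨d, hd, hcd⟩, hP⟩)
        · exact Or.inl (Or.inl hout)
        · rcases List.mem_cons.mp hd with rfl | hd'
          · exact Or.inl (Or.inr hcd)
          · exact Or.inr ⟨⟨d, hd', hcd⟩, hP⟩
    · rw [ih]
      constructor
      · rintro (hout | ⟨⟨d, hd, hcd⟩, hP⟩)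
        · exact Or.inl hout
        · exact Or.inr ⟨⟨d, List.mem_cons_of_mem _ hd, hcd⟩, hP⟩
      · rintro (hout | ⟨⟨d, hd, hcd⟩, hPv, hPx, hPs⟩)
        · exact Or.inl hout
        · rcases List.mem_cons.mp hd with rfl | hd'
          · left
            by_contra hco
            rw [hcd] at hPv hPx hPs hco
            exact hG ⟨((pvValid_isValid _ _).mpr hPv).1, ((pvValid_isValid _ _).mpr hPv).2,
              hPs, hco, hPx⟩
          · exact Or.inr ⟨⟨d, hd', hcd⟩, hPv, hPx, hPs⟩

theorem expand_mem (place : List (List String)) (deltas : List (Int × Int))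
    (cells : List (Int × Int)) (seen : PySem.Set (Int × Int)) (c : Int × Int) :
    c ∈ pvExpand place deltas cells seen ↔
      (∃ b ∈ cells, pvNbr deltas b c) ∧ pvValid c ∧ pvCell place c.1 c.2 ≠ "X" ∧ c ∉ seen := by
  unfold pvExpand
  have gen : ∀ (cs : List (Int × Int)) (acc : List (Int × Int)),
      (c ∈ cs.foldl (fun out b => deltas.foldl (pvExpandInner place seen b) out) acc ↔
        c ∈ acc ∨ ((∃ b ∈ cs, pvNbr deltas b c) ∧ pvValid c ∧
          pvCell place c.1 c.2 ≠ "X" ∧ c ∉ seen)) := by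
    intro cs
    induction cs with
    | nil =>
      intro acc
      simp
    | cons b rest ihc =>
      intro acc
      rw [List.foldl_cons, ihc, expand_inner_mem]
      unfold pvNbr
      constructor
      · rintro ((hout | ⟨hnb, hP⟩) | ⟨⟨bb, hbb, hnb⟩, hP⟩)
        · exact Or.inl hout
        · exact Or.inr ⟨⟨b, List.mem_cons_self, hnb⟩, hP⟩
        · exact Or.inr ⟨⟨bb, List.mem_cons_of_mem _ hbb, hnb⟩, hP⟩
      · rintro (hout | ⟨⟨bb, hbb, hnb⟩, hP⟩)
        · exact Or.inl (Or.inl hout)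
        · rcases List.mem_cons.mp hbb with rfl | hbb'
          · exact Or.inl (Or.inr ⟨hnb, hP⟩)
          · exact Or.inr ⟨⟨bb, hbb', hnb⟩, hP⟩
  rw [gen cells []]
  simp

theorem alt_char (start : Int × Int) (place : List (List String)) (deltas : List (Int × Int)) :
    (bfs_alt start place deltas = true ↔
      (∀ c, pvL1 place deltas start c → pvNonP place c) ∧
        (∀ c, pvL2 place deltas start c → pvNonP place c)) := by
  have hl1 : ∀ c, c ∈ pvExpand place deltas [start] (PySem.Set.ofList [start]) ↔
      pvL1 place deltas start c := by
    intro c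
    rw [expand_mem]
    unfold pvL1 pvOpen pvNbr
    simp [PySem.Set.mem_ofList]
    tauto
  set l1 := pvExpand place deltas [start] (PySem.Set.ofList [start]) with hl1def
  have hl2 : ∀ c, c ∈ pvExpand place deltas l1 (PySem.Set.ofList ([start] ++ l1)) ↔
      pvL2 place deltas start c := by
    intro c
    rw [expand_mem]
    unfold pvL2 pvL1 pvOpen pvNbr
    simp only [PySem.Set.mem_ofList, List.mem_append, List.mem_singleton]
    constructor
    · rintro ⟨⟨bb, hbb, hnb⟩, hcv, hcx, hns⟩
      push_neg at hns
      refine ⟨⟨bb, (hl1 bb).mp hbb, hnb⟩, ⟨hcv, hcx⟩, hns.1, fun hc1 => hns.2 ((hl1 c).mpr hc1)⟩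
    · rintro ⟨⟨bb, hbb, hnb⟩, ⟨hcv, hcx⟩, hne, hnl1⟩
      exact ⟨⟨bb, (hl1 bb).mpr hbb, hnb⟩, hcv, hcx, by
        push_neg
        exact ⟨hne, fun hc1 => hnl1 ((hl1 c).mp hc1)⟩⟩
  set l2 := pvExpand place deltas l1 (PySem.Set.ofList ([start] ++ l1)) with hl2def
  show ((if l1.any (fun c => pvCell place c.1 c.2 == "P") then false
      else if l2.any (fun c => pvCell place c.1 c.2 == "P") then false else true) = true ↔ _)
  by_cases h1 : l1.any (fun c => pvCell place c.1 c.2 == "P") = true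
  · rw [if_pos h1]
    simp only [Bool.false_eq_true, false_iff]
    rintro ⟨hA, _⟩
    obtain ⟨c, hcm, hcP⟩ := List.any_eq_true.mp h1
    exact absurd (beq_iff_eq.mp hcP) (hA c ((hl1 c).mp hcm))
  · rw [if_neg h1]
    by_cases h2 : l2.any (fun c => pvCell place c.1 c.2 == "P") = true
    · rw [if_pos h2]
      simp only [Bool.false_eq_true, false_iff]
      rintro ⟨_, hB⟩
      obtain ⟨c, hcm, hcP⟩ := List.any_eq_true.mp h2
      exact absurd (beq_iff_eq.mp hcP) (hB c ((hl2 c).mp hcm))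
    · rw [if_neg h2]
      simp only [true_iff]
      constructor
      · intro c hc hP
        exact h1 (List.any_eq_true.mpr ⟨c, (hl1 c).mpr hc, beq_iff_eq.mpr hP⟩)
      · intro c hc hP
        exact h2 (List.any_eq_true.mpr ⟨c, (hl2 c).mpr hc, beq_iff_eq.mpr hP⟩)

theorem bfsLoop_nil (start : Int × Int) (place : List (List String))
    (deltas : List (Int × Int)) (n : Nat) (dist : List (List Int)) :
    bfsLoop start place deltas (n + 1) [] dist = true := rfl

-- 'no usable first step': each neighbour of start is out of bounds, the start itself, or an 'X' cell
def pvStuck (place : List (List String)) (start : Int × Int) (d : Int × Int) : Prop :=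
  ¬ pvValid (start.1 + d.1, start.2 + d.2) ∨ (start.1 + d.1, start.2 + d.2) = start ∨
    pvCell place (start.1 + d.1) (start.2 + d.2) = "X"

theorem foldInner_noMove_A (place : List (List String)) (start : Int × Int)
    (q : List (Int × Int)) (dist : List (List Int))
    (hself : pvValid start → dg dist start ≠ -1) :
    ∀ ds : List (Int × Int), (∀ d ∈ ds, pvStuck place start d) →
    ds.foldl (bfsInner place start start.1 start.2) (q, dist) = (q, dist) := by
  intro ds
  induction ds with
  | nil => intro _; rfl
  | cons d ds' ih =>
    intro h
    rw [List.foldl_cons, bfsInner_eq, if_neg (by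
      rintro ⟨hv, hd1, hX⟩
      rcases h d List.mem_cons_self with hbad | heq | hbad
      · exact hbad hv
      · have e1 : start.1 + d.1 = start.1 := congrArg Prod.fst heq
        have e2 : start.2 + d.2 = start.2 := congrArg Prod.snd heq
        rw [heq] at hv
        rw [e1, e2] at hd1
        exact hself hv hd1
      · exact hX hbad)]
    exact ih fun d' hd' => h d' (List.mem_cons_of_mem _ hd')

theorem bfs_noMove (start : Int × Int) (place : List (List String)) (deltas : List (Int × Int))
    (h : ∀ d ∈ deltas, pvStuck place start d) :
    bfs start place deltas = true := by
  obtain ⟨sy, sx⟩ := start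
  show bfsLoop (sy, sx) place deltas 26 [(sy, sx)] (pvDSet dist0def sy sx 0) = true
  rw [show (26 : Nat) = 25 + 1 from rfl, bfsLoop_succ_cons,
    if_neg (by rintro ⟨hne, _, _⟩; exact hne rfl),
    foldInner_noMove_A place (sy, sx) [] _
      (fun hv => by rw [show dg (pvDSet dist0def sy sx 0) (sy, sx) =
          dg (ds dist0def (sy, sx) 0) (sy, sx) from rfl, dg_ds shape_dist0 hv hv, if_pos rfl]; omega)
      deltas h]
  rw [show (25 : Nat) = 24 + 1 from rfl]
  exact bfsLoop_nil _ _ _ _ _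

theorem foldInner_noMove_B (place : List (List String)) (start : Int × Int)
    (out : List (Int × Int)) :
    ∀ ds : List (Int × Int), (∀ d ∈ ds, pvStuck place start d) →
    ds.foldl (pvExpandInner place (PySem.Set.ofList [start]) start) out = out := by
  intro ds
  induction ds with
  | nil => intro _; rfl
  | cons d ds' ih =>
    intro h
    rw [List.foldl_cons]
    show ds'.foldl (pvExpandInner place (PySem.Set.ofList [start]) start)
      (if pvIsValid (start.1 + d.1) ∧ pvIsValid (start.2 + d.2) ∧ _ ∧ _ ∧ _ then _ else out) = out
    rw [if_neg (by
      rintro ⟨hy, hx, hns, _, hX⟩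
      rcases h d List.mem_cons_self with hbad | heq | hbad
      · exact hbad ((pvValid_isValid _ _).mp ⟨hy, hx⟩)
      · exact hns (by rw [heq]; simp [PySem.Set.mem_ofList])
      · exact hX hbad)]
    exact ih fun d' hd' => h d' (List.mem_cons_of_mem _ hd')

theorem alt_noMove (start : Int × Int) (place : List (List String)) (deltas : List (Int × Int))
    (h : ∀ d ∈ deltas, pvStuck place start d) :
    bfs_alt start place deltas = true := by
  have hl1 : pvExpand place deltas [start] (PySem.Set.ofList [start]) = [] := by
    unfold pvExpand
    rw [List.foldl_cons, List.foldl_nil, foldInner_noMove_B place start [] deltas h]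
  show (if (pvExpand place deltas [start] (PySem.Set.ofList [start])).any
      (fun c => pvCell place c.1 c.2 == "P") then false
    else _) = true
  rw [hl1]
  simp only [List.any_nil, Bool.false_eq_true, if_false]
  have hl2 : pvExpand place deltas []
      (PySem.Set.ofList ([start] ++ ([] : List (Int × Int)))) = [] := rfl
  rw [hl2]
  simp


-- ===== VERDICT (by name: the statement is the Claim_ definition above) =====
theorem bfs_spec : Claim_equal_bfs := by
  intro start place deltas _ hpre
  unfold Spec_bfs
  obtain ⟨hbox, hcase⟩ := hpre
  rcases hcase with ⟨h1, h2, _, _⟩ | hnm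
  · have hs : pvValid start := ⟨h1, hbox.2.1, h2, hbox.2.2.2⟩
    rw [Bool.eq_iff_iff, bfs_char start place deltas hs, alt_char]
  · have h' : ∀ d ∈ deltas, pvStuck place start d := by
      intro d hd
      rcases hnm d hd with hbad | heq | ⟨_, _, hX⟩
      · exact Or.inl hbad
      · exact Or.inr (Or.inl heq)
      · exact Or.inr (Or.inr hX)
    rw [bfs_noMove start place deltas h', alt_noMove start place deltas h']
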